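-- pv_equiv track=rewrite | github.com/Fabianstw/Puzzles | AOC/Y24/5/py2.py | fixMessage
-- ===== SOURCE A (Python) =====
-- rules = {}
--
-- def fixMessage(rules, message):
-- 	newMessage = []
-- 	l = len(message)
-- 	for j in range(l):
-- 		for i in range(len(message)):
-- 			if message[i] in rules:
-- 				if all(x in rules[message[i]] for x in message if x != message[i]):
-- 					newMessage.append(message[i])
-- 					message.pop(i)
-- 					break
-- 	return newMessage
-- ===== SOURCE B (Python) =====
-- def fixMessage(rules, message):
--     # Precompute, per distinct value v of message that has a rule, the set of its
--     # successors and bad[v] = how many elements of message are neither v nor in that set.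
--     # Then repeatedly emit the first element whose bad-count is zero, decrementing
--     # counts incrementally instead of rescanning the rules lists each round.
--     # (Unlike A, this does not mutate the caller's message list.)
--     rset = {}
--     bad = {}
--     for v in message:
--         if v not in bad and v in rules:
--             s = set(rules[v])
--             rset[v] = s
--             bad[v] = sum(1 for x in message if x != v and x not in s)
--     remaining = list(message)
--     out = []
--     progress = True
--     while progress:
--         progress = False
--         for i, v in enumerate(remaining):
--             if v in bad and bad[v] == 0:
--                 out.append(v)
--                 remaining.pop(i)
--                 for u in bad:
--                     if u != v and v not in rset[u]:
--                         bad[u] -= 1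
--                 progress = True
--                 break
--     return out
-- ===== Notes on version B (the rewrite author's own statement) =====
-- stated objective: faster
-- what changed: Instead of rescanning the whole message against the rules list for every candidate in every round, B precomputes each value's successor set and a bad-count (how many other elements are not among its successors) once, then repeatedly emits the first zero-count element while decrementing the counts incrementally.
import Mathlib
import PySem

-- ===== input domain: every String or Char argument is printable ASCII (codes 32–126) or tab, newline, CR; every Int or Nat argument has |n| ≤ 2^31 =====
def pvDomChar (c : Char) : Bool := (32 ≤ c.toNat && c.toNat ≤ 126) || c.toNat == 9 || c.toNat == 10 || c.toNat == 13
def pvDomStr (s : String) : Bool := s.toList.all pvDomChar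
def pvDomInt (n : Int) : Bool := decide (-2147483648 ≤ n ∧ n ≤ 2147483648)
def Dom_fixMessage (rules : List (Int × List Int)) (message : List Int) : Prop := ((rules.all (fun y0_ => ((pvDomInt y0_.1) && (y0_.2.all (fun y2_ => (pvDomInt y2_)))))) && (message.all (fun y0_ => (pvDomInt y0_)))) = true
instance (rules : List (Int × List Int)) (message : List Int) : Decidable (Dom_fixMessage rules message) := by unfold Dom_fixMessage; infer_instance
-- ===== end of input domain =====

-- B replaces A's rescan-per-round (a membership test over the whole rules list for every
-- candidate, every round) by precomputed successor sets and incrementally maintained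
-- bad-counts (objective: faster). Equivalence is about the RETURN value only: Python A
-- pops elements from the caller's `message` list in place, B does not mutate it.


-- ===== PORT A =====
-- `rules` is a Python dict; as an association list, lookup is first match (PySem.Dict.get?)
def pyLookup (rules : List (Int × List Int)) (v : Int) : Option (List Int) :=
  (PySem.Dict.mk rules).get? v

-- `message[i] in rules` and `all(x in rules[message[i]] for x in message if x != message[i])`
-- (the generator's `if x != m` filter makes the per-element condition `x == m or x in rules[m]`)
def aCheck (rules : List (Int × List Int)) (msg : List Int) (v : Int) : Bool :=
  match pyLookup rules v with
  | none => false
  | some rv => msg.all (fun x => x == v || rv.contains x)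

-- the inner `for i in range(len(message))` with `message.pop(i); break`: scan for the first
-- qualifying element, returning it together with the list with that occurrence removed
def aFind (rules : List (Int × List Int)) (full : List Int) :
    List Int → List Int → Option (Int × List Int)
  | _pre, [] => none
  | pre, v :: t =>
      if aCheck rules full v then some (v, pre.reverse ++ t)
      else aFind rules full (v :: pre) t

-- the outer `for j in range(l)` loop over the shrinking message, accumulating newMessage
def aLoop (rules : List (Int × List Int)) : Nat → List Int → List Int → List Int
  | 0, _msg, acc => acc
  | j + 1, msg, acc =>
      match aFind rules msg [] msg with
      | none => aLoop rules j msg acc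
      | some (v, msg') => aLoop rules j msg' (acc ++ [v])

def fixMessage (rules : List (Int × List Int)) (message : List Int) : List Int :=
  aLoop rules message.length message []

-- ===== PORT B =====
-- setup loop: `for v in message: if v not in bad and v in rules: rset[v] = set(rules[v]);
-- bad[v] = sum(1 for x in message if x != v and x not in s)`
def bSetup (rules : List (Int × List Int)) (message : List Int) :
    PySem.Dict Int (PySem.Set Int) × PySem.Dict Int Int :=
  message.foldl
    (fun st v =>
      if st.2.contains v then st
      else
        match pyLookup rules v with
        | none => st
        | some rv =>
            let s := PySem.Set.ofList rv
            (st.1.insert v s,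
             st.2.insert v
               ((message.filter (fun x => !(x == v) && !(PySem.Set.contains s x))).length : Int)))
    (PySem.Dict.empty, PySem.Dict.empty)

-- `v in bad and bad[v] == 0`
def bPred (bad : PySem.Dict Int Int) (v : Int) : Bool :=
  match bad.get? v with
  | some c => c == 0
  | none => false

-- `for i, v in enumerate(remaining): if ...: remaining.pop(i); break`
def bFind (bad : PySem.Dict Int Int) :
    List Int → List Int → Option (Int × List Int)
  | _pre, [] => none
  | pre, v :: t =>
      if bPred bad v then some (v, pre.reverse ++ t)
      else bFind bad (v :: pre) t

-- the next two lemmas are cited by bLoop's decreasing_by (termination of the while loop)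
theorem bFind_some_shape (bad : PySem.Dict Int Int) :
    ∀ (rest pre : List Int) (v : Int) (l : List Int),
      bFind bad pre rest = some (v, l) →
      ∃ l₁ l₂, rest = l₁ ++ v :: l₂ ∧ l = pre.reverse ++ (l₁ ++ l₂) ∧ bPred bad v = true := by
  intro rest
  induction rest with
  | nil => intro pre v l h; simp [bFind] at h
  | cons w t ih =>
      intro pre v l h
      by_cases hp : bPred bad w
      · simp [bFind, hp] at h
        obtain ⟨h1, h2⟩ := h
        exact ⟨[], t, by simp [h1], h2.symm, h1 ▸ hp⟩
      · simp [bFind, hp] at h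
        obtain ⟨l₁, l₂, h1, h2, h3⟩ := ih (w :: pre) v l h
        exact ⟨w :: l₁, l₂, by simp [h1], by simp [h2], h3⟩

theorem bFind_some_length (bad : PySem.Dict Int Int) (rest : List Int) (v : Int) (l : List Int)
    (h : bFind bad [] rest = some (v, l)) : l.length < rest.length := by
  obtain ⟨l₁, l₂, h1, h2, _⟩ := bFind_some_shape bad rest [] v l h
  subst h1; subst h2; simp

-- the `while progress` loop; Python's `rset[u]` always finds its key here (every key of
-- `bad` was inserted into `rset` in the same step), so `(rset.get? u).getD ∅` is exact
def bLoop (rset : PySem.Dict Int (PySem.Set Int)) (bad : PySem.Dict Int Int)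
    (remaining out : List Int) : List Int :=
  match h : bFind bad [] remaining with
  | none => out
  | some (v, rem') =>
      bLoop rset
        (bad.keys.foldl
          (fun b u =>
            if !(u == v) && !(PySem.Set.contains ((rset.get? u).getD PySem.Set.empty) v)
            then b.modify u 0 (· - 1) else b)
          bad)
        rem' (out ++ [v])
termination_by remaining.length
decreasing_by exact bFind_some_length bad remaining v rem' h

def fixMessage_alt (rules : List (Int × List Int)) (message : List Int) : List Int :=
  let st := bSetup rules message
  bLoop st.1 st.2 message []

-- ===== PRECONDITION & SPEC =====
def Spec_fixMessage (rules : List (Int × List Int)) (message : List Int) (out : List Int) : Prop := out = fixMessage_alt rules message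
instance (rules : List (Int × List Int)) (message : List Int) (out : List Int) : Decidable (Spec_fixMessage rules message out) := by unfold Spec_fixMessage; infer_instance

-- ===== CLAIM (what is proved, stated in full; the proofs are below) =====
def Claim_equal_fixMessage : Prop := ∀ (rules : List (Int × List Int)) (message : List Int), Dom_fixMessage rules message → Spec_fixMessage rules message (fixMessage rules message)

-- ===== LEMMAS AND PROOFS =====

-- B's bad-count of u over msg, given u's rule list rv
def cnt (msg : List Int) (u : Int) (rv : List Int) : Int :=
  ((msg.filter (fun x => !(x == u) && !(PySem.Set.contains (PySem.Set.ofList rv) x))).length : Int)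

-- loop invariant tying B's incremental state to the current remaining list
def LoopInv (rules : List (Int × List Int)) (rset : PySem.Dict Int (PySem.Set Int))
    (bad : PySem.Dict Int Int) (msg : List Int) : Prop :=
  bad.keys.Nodup ∧
  (∀ v ∈ msg, bad.contains v = (pyLookup rules v).isSome) ∧
  (∀ u, bad.contains u = true →
    ∃ rv, pyLookup rules u = some rv ∧ bad.getD u 0 = cnt msg u rv ∧
      rset.get? u = some (PySem.Set.ofList rv))

theorem setContains_ofList (rv : List Int) (x : Int) :
    PySem.Set.contains (PySem.Set.ofList rv) x = rv.contains x := by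
  have h1 := PySem.Set.contains_iff (PySem.Set.ofList rv) x
  rw [Bool.eq_iff_iff, h1, PySem.Set.mem_ofList]
  simp

theorem pred_eq (rules : List (Int × List Int)) (rset : PySem.Dict Int (PySem.Set Int))
    (bad : PySem.Dict Int Int) (msg : List Int) (hInv : LoopInv rules rset bad msg)
    (v : Int) (hv : v ∈ msg) : bPred bad v = aCheck rules msg v := by
  unfold bPred aCheck
  cases hl : pyLookup rules v with
  | none =>
      have hc : bad.contains v = false := by rw [hInv.2.1 v hv, hl]; rfl
      have hg : bad.get? v = none := (PySem.Dict.get?_eq_none_iff_contains bad v).mpr hc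
      simp [hg]
  | some rv =>
      have hc : bad.contains v = true := by rw [hInv.2.1 v hv, hl]; rfl
      obtain ⟨rv', hrv', hgd, _⟩ := hInv.2.2 v hc
      rw [hl] at hrv'
      injection hrv' with hee; subst hee
      cases hg : bad.get? v with
      | none => rw [PySem.Dict.get?_eq_none_iff_contains] at hg; rw [hg] at hc; cases hc
      | some c =>
          have hcv : c = cnt msg v rv := by
            rw [PySem.Dict.getD_eq_get?_getD, hg] at hgd; simpa using hgd
          rw [Bool.eq_iff_iff]
          simp only [hcv, cnt, beq_iff_eq]
          rw [Nat.cast_eq_zero, List.length_eq_zero_iff, List.filter_eq_nil_iff]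
          simp
          exact forall₂_congr (fun x hx => (or_iff_not_imp_left).symm)

theorem find_congr (rules : List (Int × List Int)) (bad : PySem.Dict Int Int) (full : List Int)
    (h : ∀ x ∈ full, bPred bad x = aCheck rules full x) :
    ∀ (rest pre : List Int), (∀ x ∈ rest, x ∈ full) →
      bFind bad pre rest = aFind rules full pre rest := by
  intro rest
  induction rest with
  | nil => intro pre _; rfl
  | cons w t ih =>
      intro pre hsub
      have hw : bPred bad w = aCheck rules full w := h w (hsub w (by simp))
      by_cases hp : bPred bad w
      · simp [bFind, aFind, hp, hw ▸ hp]
      · have h2 : aCheck rules full w = false := hw ▸ (by simpa using hp)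
        simp [bFind, aFind, hp, h2]
        exact ih (w :: pre) (fun x hx => hsub x (by simp [hx]))

theorem foldl_dec_keys (v : Int) (rset : PySem.Dict Int (PySem.Set Int)) :
    ∀ (ks : List Int) (b : PySem.Dict Int Int), (∀ x ∈ ks, b.contains x = true) →
      (ks.foldl
        (fun b u =>
          if !(u == v) && !(PySem.Set.contains ((rset.get? u).getD PySem.Set.empty) v)
          then b.modify u 0 (· - 1) else b) b).keys = b.keys := by
  intro ks
  induction ks with
  | nil => intro b _; rfl
  | cons k t ih =>
      intro b h
      simp only [List.foldl_cons]
      have hk : b.contains k = true := h k (by simp)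
      split
      · have hkeys : (b.modify k 0 (· - 1)).keys = b.keys := by
          rw [PySem.Dict.keys_modify]
          exact PySem.Dict.keys_insert_of_contains b _ hk
        rw [ih _ (fun x hx => by
          rw [PySem.Dict.contains_eq_decide_mem_keys, hkeys,
            ← PySem.Dict.contains_eq_decide_mem_keys]
          exact h x (by simp [hx])), hkeys]
      · exact ih b (fun x hx => h x (by simp [hx]))

theorem foldl_dec_getD (v : Int) (rset : PySem.Dict Int (PySem.Set Int)) (u : Int) :
    ∀ (ks : List Int) (b : PySem.Dict Int Int),
      (ks.foldl
        (fun b u =>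
          if !(u == v) && !(PySem.Set.contains ((rset.get? u).getD PySem.Set.empty) v)
          then b.modify u 0 (· - 1) else b) b).getD u 0
      = b.getD u 0 -
        ((ks.filter (fun k =>
            !(k == v) && !(PySem.Set.contains ((rset.get? k).getD PySem.Set.empty) v))).count u : Int) := by
  intro ks
  induction ks with
  | nil => intro b; simp
  | cons k t ih =>
      intro b
      simp only [List.foldl_cons, List.filter_cons]
      split
      · rw [ih, PySem.Dict.getD_modify]
        by_cases hu : u = k
        · subst hu; simp; omega
        · simp [hu, Ne.symm hu]
      · rw [ih]

theorem inv_step (rules : List (Int × List Int)) (rset : PySem.Dict Int (PySem.Set Int))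
    (bad : PySem.Dict Int Int) (l₁ l₂ : List Int) (v : Int)
    (hInv : LoopInv rules rset bad (l₁ ++ v :: l₂)) :
    LoopInv rules rset
      (bad.keys.foldl
        (fun b u =>
          if !(u == v) && !(PySem.Set.contains ((rset.get? u).getD PySem.Set.empty) v)
          then b.modify u 0 (· - 1) else b) bad)
      (l₁ ++ l₂) := by
  obtain ⟨hnd, hmem, hval⟩ := hInv
  have hallkeys : ∀ x ∈ bad.keys, bad.contains x = true := by
    intro x hx; rw [PySem.Dict.contains_eq_decide_mem_keys]; simp [hx]
  have hkeys := foldl_dec_keys v rset bad.keys bad hallkeys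
  have hcont : ∀ x, (bad.keys.foldl
      (fun b u =>
        if !(u == v) && !(PySem.Set.contains ((rset.get? u).getD PySem.Set.empty) v)
        then b.modify u 0 (· - 1) else b) bad).contains x = bad.contains x := by
    intro x
    rw [PySem.Dict.contains_eq_decide_mem_keys, hkeys, ← PySem.Dict.contains_eq_decide_mem_keys]
  refine ⟨by rw [hkeys]; exact hnd, ?_, ?_⟩
  · intro x hx
    rw [hcont]
    exact hmem x (by simp at hx ⊢; tauto)
  · intro u hu
    rw [hcont] at hu
    obtain ⟨rv, hrv, hgd, hrs⟩ := hval u hu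
    refine ⟨rv, hrv, ?_, hrs⟩
    rw [foldl_dec_getD, hgd]
    have humem : u ∈ bad.keys := by
      rw [PySem.Dict.contains_eq_decide_mem_keys] at hu; simpa using hu
    have hcnt1 : bad.keys.count u = 1 := List.count_eq_one_of_mem hnd humem
    have hset : PySem.Set.contains ((rset.get? u).getD PySem.Set.empty) v = rv.contains v := by
      rw [hrs]; simp
    by_cases hcond : (!(u == v) && !(PySem.Set.contains ((rset.get? u).getD PySem.Set.empty) v)) = true
    · have hcount := List.count_filter
        (p := fun k => !(k == v) && !(PySem.Set.contains ((rset.get? k).getD PySem.Set.empty) v))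
        (a := u) (l := bad.keys) hcond
      rw [hcount, hcnt1]
      simp only [Bool.and_eq_true, Bool.not_eq_true', beq_eq_false_iff_ne] at hcond
      have hvrv : rv.contains v = false := hset ▸ hcond.2
      unfold cnt
      simp only [List.filter_append, List.filter_cons, List.length_append]
      have hp : (!(v == u) && !(PySem.Set.contains (PySem.Set.ofList rv) v)) = true := by
        simp only [Bool.and_eq_true, Bool.not_eq_true', beq_eq_false_iff_ne, setContains_ofList]
        exact ⟨Ne.symm hcond.1, hvrv⟩
      rw [hp]
      simp
      ring
    · have hcount : ((bad.keys.filter (fun k =>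
          !(k == v) && !(PySem.Set.contains ((rset.get? k).getD PySem.Set.empty) v))).count u) = 0 := by
        apply List.count_eq_zero_of_not_mem
        intro hmemf
        rw [List.mem_filter] at hmemf
        exact hcond hmemf.2
      rw [hcount]
      unfold cnt
      simp only [List.filter_append, List.filter_cons, List.length_append]
      have hp : (!(v == u) && !(PySem.Set.contains (PySem.Set.ofList rv) v)) = false := by
        rw [setContains_ofList]
        by_cases huv : u = v
        · subst huv; simp
        · have hct : PySem.Set.contains ((rset.get? u).getD PySem.Set.empty) v = true := by
            by_contra hf
            rw [Bool.not_eq_true] at hf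
            have hnm : v ∉ ((rset.get? u).getD PySem.Set.empty) := by
              intro hmem'
              rw [(PySem.Set.contains_iff _ _).mpr hmem'] at hf
              cases hf
            exact hcond (by simp [huv]; exact hnm)
          rw [hset] at hct
          rw [hct]
          simp
      rw [hp]
      simp

theorem setup_go (rules : List (Int × List Int)) (message : List Int) :
    ∀ (l : List Int) (rset : PySem.Dict Int (PySem.Set Int)) (bad : PySem.Dict Int Int),
      bad.keys.Nodup →
      (∀ u, bad.contains u = true →
        ∃ rv, pyLookup rules u = some rv ∧ bad.getD u 0 = cnt message u rv ∧
          rset.get? u = some (PySem.Set.ofList rv)) →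
      (l.foldl
        (fun st v =>
          if st.2.contains v then st
          else
            match pyLookup rules v with
            | none => st
            | some rv =>
                let s := PySem.Set.ofList rv
                (st.1.insert v s,
                 st.2.insert v
                   ((message.filter (fun x => !(x == v) && !(PySem.Set.contains s x))).length : Int)))
        (rset, bad)).2.keys.Nodup ∧
      (∀ u, (l.foldl
        (fun st v =>
          if st.2.contains v then st
          else
            match pyLookup rules v with
            | none => st
            | some rv =>
                let s := PySem.Set.ofList rv
                (st.1.insert v s,
                 st.2.insert v
                   ((message.filter (fun x => !(x == v) && !(PySem.Set.contains s x))).length : Int)))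
        (rset, bad)).2.contains u = true →
        ∃ rv, pyLookup rules u = some rv ∧
          (l.foldl
            (fun st v =>
              if st.2.contains v then st
              else
                match pyLookup rules v with
                | none => st
                | some rv =>
                    let s := PySem.Set.ofList rv
                    (st.1.insert v s,
                     st.2.insert v
                       ((message.filter (fun x => !(x == v) && !(PySem.Set.contains s x))).length : Int)))
            (rset, bad)).2.getD u 0 = cnt message u rv ∧
          (l.foldl
            (fun st v =>
              if st.2.contains v then st
              else
                match pyLookup rules v with
                | none => st
                | some rv =>
                    let s := PySem.Set.ofList rv
                    (st.1.insert v s,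
                     st.2.insert v
                       ((message.filter (fun x => !(x == v) && !(PySem.Set.contains s x))).length : Int)))
            (rset, bad)).1.get? u = some (PySem.Set.ofList rv)) ∧
      (∀ x, (l.foldl
        (fun st v =>
          if st.2.contains v then st
          else
            match pyLookup rules v with
            | none => st
            | some rv =>
                let s := PySem.Set.ofList rv
                (st.1.insert v s,
                 st.2.insert v
                   ((message.filter (fun x => !(x == v) && !(PySem.Set.contains s x))).length : Int)))
        (rset, bad)).2.contains x
        = (bad.contains x || (decide (x ∈ l) && (pyLookup rules x).isSome))) := by
  intro l
  induction l with
  | nil =>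
      intro rset bad hnd hval
      exact ⟨hnd, hval, by simp⟩
  | cons w t ih =>
      intro rset bad hnd hval
      simp only [List.foldl_cons]
      by_cases hcw : bad.contains w = true
      · simp only [hcw, if_pos]
        obtain ⟨h1, h2, h3⟩ := ih rset bad hnd hval
        refine ⟨h1, h2, ?_⟩
        intro x
        rw [h3 x]
        by_cases hxw : x = w
        · subst hxw; simp [hcw]
        · simp [hxw]
      · simp only [Bool.not_eq_true] at hcw
        simp only [hcw, Bool.false_eq_true, if_false]
        cases hl : pyLookup rules w with
        | none =>
            obtain ⟨h1, h2, h3⟩ := ih rset bad hnd hval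
            refine ⟨h1, h2, ?_⟩
            intro x
            rw [h3 x]
            by_cases hxw : x = w
            · subst hxw; simp [hcw, hl]
            · simp [hxw]
        | some rv =>
            have hvalnew : ∀ u, (bad.insert w ((message.filter
                (fun x => !(x == w) && !(PySem.Set.contains (PySem.Set.ofList rv) x))).length : Int)).contains u = true →
                ∃ rv', pyLookup rules u = some rv' ∧
                  (bad.insert w ((message.filter
                    (fun x => !(x == w) && !(PySem.Set.contains (PySem.Set.ofList rv) x))).length : Int)).getD u 0 = cnt message u rv' ∧
                  (rset.insert w (PySem.Set.ofList rv)).get? u = some (PySem.Set.ofList rv') := by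
              intro u hu
              rw [PySem.Dict.contains_insert] at hu
              by_cases huw : u = w
              · subst huw
                refine ⟨rv, hl, ?_, ?_⟩
                · rw [PySem.Dict.getD_insert]; simp [cnt]
                · rw [PySem.Dict.get?_insert]; simp
              · have hu' : bad.contains u = true := by
                  simp [huw] at hu; exact hu
                obtain ⟨rv', hrv', hgd', hrs'⟩ := hval u hu'
                refine ⟨rv', hrv', ?_, ?_⟩
                · rw [PySem.Dict.getD_insert]; simp [huw, hgd']
                · rw [PySem.Dict.get?_insert]; simp [huw, hrs']
            obtain ⟨h1, h2, h3⟩ := ih (rset.insert w (PySem.Set.ofList rv))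
              (bad.insert w ((message.filter
                (fun x => !(x == w) && !(PySem.Set.contains (PySem.Set.ofList rv) x))).length : Int))
              (PySem.Dict.nodup_keys_insert bad w _ hnd) hvalnew
            refine ⟨h1, h2, ?_⟩
            intro x
            rw [h3 x, PySem.Dict.contains_insert]
            by_cases hxw : x = w
            · subst hxw; simp [hcw, hl]
            · have hbe : (x == w) = false := by simp [hxw]
              simp [hbe, hxw, List.mem_cons]

theorem setup_inv (rules : List (Int × List Int)) (message : List Int) :
    LoopInv rules (bSetup rules message).1 (bSetup rules message).2 message := by
  obtain ⟨h1, h2, h3⟩ := setup_go rules message message PySem.Dict.empty PySem.Dict.empty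
    PySem.Dict.nodup_keys_empty
    (fun u hu => absurd hu (by simp [PySem.Dict.contains_empty]))
  exact ⟨h1, fun v hv => by rw [bSetup, h3 v]; simp [hv], h2⟩

theorem aLoop_stuck (rules : List (Int × List Int)) (msg : List Int)
    (h : aFind rules msg [] msg = none) :
    ∀ (j : Nat) (acc : List Int), aLoop rules j msg acc = acc := by
  intro j
  induction j with
  | zero => intro acc; rfl
  | succ j ih => intro acc; simp only [aLoop, h]; exact ih acc

theorem main_loop (rules : List (Int × List Int)) (rset : PySem.Dict Int (PySem.Set Int)) :
    ∀ (j : Nat) (msg : List Int) (bad : PySem.Dict Int Int) (acc : List Int),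
      LoopInv rules rset bad msg → msg.length ≤ j →
      aLoop rules j msg acc = bLoop rset bad msg acc := by
  intro j
  induction j with
  | zero =>
      intro msg bad acc _hInv hlen
      have hmsg : msg = [] := List.eq_nil_of_length_eq_zero (Nat.le_zero.mp hlen)
      subst hmsg
      rw [bLoop]
      rfl
  | succ j ih =>
      intro msg bad acc hInv hlen
      have hpred : ∀ x ∈ msg, bPred bad x = aCheck rules msg x :=
        fun x hx => pred_eq rules rset bad msg hInv x hx
      have hfind : bFind bad [] msg = aFind rules msg [] msg :=
        find_congr rules bad msg hpred msg [] (fun x hx => hx)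
      cases hbf : bFind bad [] msg with
      | none =>
          have haf : aFind rules msg [] msg = none := hfind ▸ hbf
          rw [show aLoop rules (j+1) msg acc = aLoop rules j msg acc from by
            simp only [aLoop, haf]]
          rw [aLoop_stuck rules msg haf j acc, bLoop, hbf]
      | some p =>
          obtain ⟨v, rem⟩ := p
          obtain ⟨l₁, l₂, hsplit, hrem, _⟩ := bFind_some_shape bad msg [] v rem hbf
          simp only [List.reverse_nil, List.nil_append] at hrem
          have haf : aFind rules msg [] msg = some (v, rem) := hfind ▸ hbf
          rw [show aLoop rules (j+1) msg acc = aLoop rules j rem (acc ++ [v]) from by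
            simp only [aLoop, haf]]
          rw [bLoop, hbf]
          apply ih
          · rw [hrem]
            subst hsplit
            exact inv_step rules rset bad l₁ l₂ v hInv
          · have := bFind_some_length bad msg v rem hbf
            omega

-- ===== VERDICT (by name: the statement is the Claim_ definition above) =====
theorem fixMessage_spec : Claim_equal_fixMessage := by
  intro rules message _hdom
  unfold Spec_fixMessage fixMessage fixMessage_alt
  exact main_loop rules (bSetup rules message).1 message.length message
    (bSetup rules message).2 [] (setup_inv rules message) (le_refl _)
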